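-- pv_equiv track=rewrite | github.com/jonathonreilly/toy-physics | scripts/cl3_ks_su3_clebsch_gordan_2026_05_07_w1full.py | _is_in_irrep_su3
-- ===== SOURCE A (Python) =====
-- def _is_in_irrep_su3(w, Lambda):
--     """Check if weight w is in the weight-set of irrep with highest weight Lambda.
--
--     A weight w is in the irrep iff w ≤ Λ in the dominance order, which for
--     SU(3) means: for every Weyl image w' of w, Λ - w' ∈ Z_{≥0}-span of simple roots.
--
--     Simpler test: w is in the convex hull of the Weyl orbit of Λ.  For SU(3),
--     we can check via the 6 Weyl reflections.
--     """
--     # Weyl orbit of Λ: 6 elements (or 3 for (p, 0) or (0, q), or 1 for (0, 0)).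
--     p, q = Lambda
--     orbit = set()
--     orbit.add((p, q))
--     orbit.add((-p, p + q))
--     orbit.add((p + q, -q))
--     orbit.add((-p - q, p))
--     orbit.add((q, -p - q))
--     orbit.add((-q, -p))
--
--     # w must be ≤ each element of orbit in dominance, i.e., each orbit_el - w
--     # is a non-negative integer combination of simple roots (2,-1) and (-1, 2).
--     # The "convex hull" check: we just need that w + ρ has all 6 Weyl-orbit
--     # transforms satisfy the constraint.  But the simpler check: w must lie
--     # inside the convex polytope.
--     # Equivalent: Λ - w = n_1 α_1 + n_2 α_2 with n_1, n_2 ≥ 0 (already checked)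
--     # AND the same for all Weyl images of Λ.
--
--     for el in orbit:
--         diff = (el[0] - w[0], el[1] - w[1])
--         num1 = 2 * diff[0] + diff[1]
--         num2 = diff[0] + 2 * diff[1]
--         if num1 % 3 != 0 or num2 % 3 != 0:
--             return False
--         n_1 = num1 // 3
--         n_2 = num2 // 3
--         # We need n_1 + n_2 (sum) compatible with "w in convex hull"
--         # Actually the convex hull condition is just that ALL Weyl images
--         # have non-negative LR coefficients?  No, that's too strong.
--         # Standard fact: w is in irrep iff it is dominated by Λ, equivalently
--         # (after applying Weyl group to bring w into dominant chamber)
--         # the dominant w_+ is bounded by Λ.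
--
--     # Simplification: use the dominant-chamber check
--     # Bring w to dominant chamber via Weyl reflections
--     a, b = w
--     # Apply s_1 if a < 0, s_2 if b < 0, repeatedly.
--     for _ in range(20):
--         if a >= 0 and b >= 0:
--             break
--         if a < 0:
--             a, b = -a, a + b
--         elif b < 0:
--             a, b = a + b, -b
--     # Now (a, b) is dominant.
--     # w in irrep (p, q) iff a ≤ p and b ≤ q (in dominance order),
--     # AND a + b ≤ p + q AND (p - a) ≡ (q - b) mod 3 (center character matches).
--     # Actually for SU(3), the convex hull in dominant chamber: dominant
--     # weight (a, b) is in (p, q) iff: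
--     #   a ≤ p, b ≤ q  (this is "leq Λ in usual dominance")  → no this is too strong
--     # The correct condition: (p - a, q - b) must be expressible as non-neg
--     # integer combo of (2, -1) and (-1, 2).  i.e., 2(p-a) - (q-b) ≥ 0 and
--     # 2(q-b) - (p-a) ≥ 0 and integer.
--     diff_a = p - a
--     diff_b = q - b
--     num1 = 2 * diff_a + diff_b
--     num2 = diff_a + 2 * diff_b
--     if num1 < 0 or num2 < 0:
--         return False
--     if num1 % 3 != 0 or num2 % 3 != 0:
--         return False
--     return True
-- ===== SOURCE B (Python) =====
-- def _is_in_irrep_su3(w, Lambda):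
--     """Check if weight w is in the weight-set of irrep with highest weight Lambda.
--
--     Fold w into the dominant chamber by picking the (unique) dominant element
--     among its six Weyl images, then test that Lambda minus that dominant
--     representative is a non-negative integer combination of the simple roots.
--     No orbit of Lambda is built: Weyl reflections preserve triality mod 3, so
--     the divisibility test on the dominant representative already covers it.
--     """
--     p, q = Lambda
--     x, y = w
--     for a, b in [(x, y), (-x, x + y), (x + y, -y),
--                  (-x - y, x), (y, -x - y), (-y, -x)]:
--         if a >= 0 and b >= 0:
--             d1, d2 = p - a, q - b
--             n1, n2 = 2 * d1 + d2, d1 + 2 * d2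
--             return n1 >= 0 and n2 >= 0 and n1 % 3 == 0 and n2 % 3 == 0
--     return False  # unreachable: some Weyl image is always dominant
-- ===== Notes on version B (the rewrite author's own statement) =====
-- stated objective: simpler
-- what changed: Drops A's 6-element Weyl orbit of Lambda and its redundant mod-3 scan entirely (reflections preserve triality), and replaces A's 20-iteration reflection loop by picking the unique dominant element among the six Weyl images of w, then doing the single simple-root-combination test.
import Mathlib
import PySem

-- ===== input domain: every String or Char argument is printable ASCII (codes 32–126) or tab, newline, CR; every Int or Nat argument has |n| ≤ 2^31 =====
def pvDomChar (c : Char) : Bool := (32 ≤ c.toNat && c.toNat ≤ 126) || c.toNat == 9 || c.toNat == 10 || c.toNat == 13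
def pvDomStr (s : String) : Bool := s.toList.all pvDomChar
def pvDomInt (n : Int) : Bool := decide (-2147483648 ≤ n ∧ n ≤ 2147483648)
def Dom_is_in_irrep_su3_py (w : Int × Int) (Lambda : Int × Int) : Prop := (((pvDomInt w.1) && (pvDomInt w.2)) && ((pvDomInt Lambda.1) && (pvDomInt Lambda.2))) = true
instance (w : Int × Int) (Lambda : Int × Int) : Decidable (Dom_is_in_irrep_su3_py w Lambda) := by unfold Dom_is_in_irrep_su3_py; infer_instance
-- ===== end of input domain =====

-- B drops A's redundant mod-3 scan of Lambda's Weyl orbit and replaces A's bounded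
-- reflection loop by selecting the dominant one of w's six Weyl images (objective: simpler).

-- ===== PORT A =====
-- per-element check of A's orbit loop; true = the 'return False' condition fires
def pvOrbitFail (w : Int × Int) (el : Int × Int) : Bool :=
  let num1 := 2 * (el.1 - w.1) + (el.2 - w.2)
  let num2 := (el.1 - w.1) + 2 * (el.2 - w.2)
  (PySem.Int.mod num1 3 != 0) || (PySem.Int.mod num2 3 != 0)

-- A's 'for _ in range(20)' reflection loop (break on dominant), fuel 20, same state (a, b)
def pvFold : Nat → Int → Int → Int × Int
  | 0, a, b => (a, b)
  | n + 1, a, b =>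
    if 0 ≤ a ∧ 0 ≤ b then (a, b)
    else if a < 0 then pvFold n (-a) (a + b)
    else if b < 0 then pvFold n (a + b) (-b)
    else pvFold n a b

def is_in_irrep_su3_py (w : Int × Int) (Lambda : Int × Int) : Bool :=
  let p := Lambda.1
  let q := Lambda.2
  let orbit : PySem.Set (Int × Int) :=
    PySem.Set.add (PySem.Set.add (PySem.Set.add (PySem.Set.add (PySem.Set.add
      (PySem.Set.add PySem.Set.empty (p, q)) (-p, p + q)) (p + q, -q))
      (-p - q, p)) (q, -p - q)) (-q, -p)
  -- 'for el in orbit: … return False': the result does not depend on the set's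
  -- iteration order (all orbit elements pass or fail together), ported as any
  if orbit.any (pvOrbitFail w) then false
  else
    let ab := pvFold 20 w.1 w.2
    let diff_a := p - ab.1
    let diff_b := q - ab.2
    let num1 := 2 * diff_a + diff_b
    let num2 := diff_a + 2 * diff_b
    if num1 < 0 ∨ num2 < 0 then false
    else if PySem.Int.mod num1 3 != 0 || PySem.Int.mod num2 3 != 0 then false
    else true

-- ===== PORT B =====
-- B's for-loop over the six Weyl images of w: the first dominant image decides
def pvScan : List (Int × Int) → Int → Int → Bool
  | [], _, _ => false  -- unreachable: some Weyl image is always dominant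
  | (a, b) :: rest, p, q =>
    if 0 ≤ a ∧ 0 ≤ b then
      let d1 := p - a
      let d2 := q - b
      let n1 := 2 * d1 + d2
      let n2 := d1 + 2 * d2
      decide (0 ≤ n1) && decide (0 ≤ n2) && (PySem.Int.mod n1 3 == 0) && (PySem.Int.mod n2 3 == 0)
    else pvScan rest p q

def is_in_irrep_su3_py_alt (w : Int × Int) (Lambda : Int × Int) : Bool :=
  let p := Lambda.1
  let q := Lambda.2
  let x := w.1
  let y := w.2
  pvScan [(x, y), (-x, x + y), (x + y, -y), (-x - y, x), (y, -x - y), (-y, -x)] p q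

-- ===== PRECONDITION & SPEC =====
def Spec_is_in_irrep_su3_py (w : Int × Int) (Lambda : Int × Int) (out : Bool) : Prop := out = is_in_irrep_su3_py_alt w Lambda
instance (w : Int × Int) (Lambda : Int × Int) (out : Bool) : Decidable (Spec_is_in_irrep_su3_py w Lambda out) := by unfold Spec_is_in_irrep_su3_py; infer_instance

-- ===== CLAIM (what is proved, stated in full; the proofs are below) =====
def Claim_equal_is_in_irrep_su3_py : Prop := ∀ (w : Int × Int) (Lambda : Int × Int), Dom_is_in_irrep_su3_py w Lambda → Spec_is_in_irrep_su3_py w Lambda (is_in_irrep_su3_py w Lambda)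

-- ===== LEMMAS AND PROOFS =====

-- the final simple-root test of both programs, abstracted over the dominant representative
def pvCheck (p q a b : Int) : Bool :=
  decide (0 ≤ 2 * (p - a) + (q - b)) && decide (0 ≤ (p - a) + 2 * (q - b)) &&
    (PySem.Int.mod (2 * (p - a) + (q - b)) 3 == 0) && (PySem.Int.mod ((p - a) + 2 * (q - b)) 3 == 0)

-- the loop stops at a dominant state, any remaining fuel
lemma pvFold_dom {a b : Int} (n : Nat) (ha : 0 ≤ a) (hb : 0 ≤ b) : pvFold n a b = (a, b) := by
  cases n <;> simp [pvFold, ha, hb]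

lemma pvFold_s1 {a b : Int} (n : Nat) (ha : a < 0) : pvFold (n + 1) a b = pvFold n (-a) (a + b) := by
  simp [pvFold, ha, show ¬ (0 ≤ a ∧ 0 ≤ b) by omega]

lemma pvFold_s2 {a b : Int} (n : Nat) (ha : 0 ≤ a) (hb : b < 0) : pvFold (n + 1) a b = pvFold n (a + b) (-b) := by
  simp [pvFold, hb, show ¬ (0 ≤ a ∧ 0 ≤ b) by omega, show ¬ a < 0 by omega]

-- each orbit element fails A's mod-3 check iff Lambda and w have different triality
lemma pvOrbitFail_iff (x y p q a b : Int)
    (hmem : (a, b) ∈ [((p : Int), q), (-p, p + q), (p + q, -q), (-p - q, p), (q, -p - q), (-q, -p)]) :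
    pvOrbitFail (x, y) (a, b) = true ↔ ¬ (3 : Int) ∣ (2 * p + q - 2 * x - y) := by
  have h1 := PySem.Int.mod_eq_zero_iff_dvd (2 * (a - x) + (b - y)) 3
  have h2 := PySem.Int.mod_eq_zero_iff_dvd ((a - x) + 2 * (b - y)) 3
  simp only [pvOrbitFail, Bool.or_eq_true, bne_iff_ne, ne_eq]
  fin_cases hmem <;> omega

-- A's whole orbit pass is one triality test on Lambda - w
lemma pvOrbitAny (p q x y : Int) :
    ((PySem.Set.add (PySem.Set.add (PySem.Set.add (PySem.Set.add (PySem.Set.add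
      (PySem.Set.add PySem.Set.empty (p, q)) (-p, p + q)) (p + q, -q))
      (-p - q, p)) (q, -p - q)) (-q, -p)).any (pvOrbitFail (x, y)))
      = !decide ((3 : Int) ∣ (2 * p + q - 2 * x - y)) := by
  by_cases h3 : (3 : Int) ∣ (2 * p + q - 2 * x - y)
  · simp only [h3, decide_true, Bool.not_true, List.any_eq_false]
    intro el hel
    obtain ⟨a, b⟩ := el
    have hmem : (a, b) ∈ [((p : Int), q), (-p, p + q), (p + q, -q), (-p - q, p), (q, -p - q), (-q, -p)] := by
      simp only [PySem.Set.mem_add] at hel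
      simp only [PySem.Set.empty, List.mem_cons, List.not_mem_nil] at hel ⊢
      tauto
    rw [Bool.not_eq_true, ← Bool.not_eq_true, pvOrbitFail_iff x y p q a b hmem]
    exact not_not_intro h3
  · simp only [h3, decide_false, Bool.not_false, List.any_eq_true]
    refine ⟨(p, q), ?_, ?_⟩
    · simp [PySem.Set.mem_add, PySem.Set.empty]
    · exact (pvOrbitFail_iff x y p q p q (by simp)).mpr h3

-- core: if the fold and the scan reach the same dominant representative (of w's triality), A = B
lemma pv_main_core (x y p q a b : Int) (h : (3 : Int) ∣ (2 * a + b - (2 * x + y)))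
    (hfold : pvFold 20 x y = (a, b))
    (hscan : pvScan [(x, y), (-x, x + y), (x + y, -y), (-x - y, x), (y, -x - y), (-y, -x)] p q = pvCheck p q a b) :
    is_in_irrep_su3_py (x, y) (p, q) = is_in_irrep_su3_py_alt (x, y) (p, q) := by
  simp only [is_in_irrep_su3_py, is_in_irrep_su3_py_alt]
  rw [pvOrbitAny p q x y, hfold, hscan]
  have e1 := PySem.Int.mod_eq_zero_iff_dvd (2 * (p - a) + (q - b)) 3
  have e2 := PySem.Int.mod_eq_zero_iff_dvd ((p - a) + 2 * (q - b)) 3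
  by_cases h3 : (3 : Int) ∣ (2 * p + q - 2 * x - y)
  · have m1 : PySem.Int.mod (2 * (p - a) + (q - b)) 3 = 0 := e1.mpr (by omega)
    have m2 : PySem.Int.mod ((p - a) + 2 * (q - b)) 3 = 0 := e2.mpr (by omega)
    by_cases hn1 : 2 * (p - a) + (q - b) < 0
    · simp [pvCheck, h3, hn1, show ¬ 0 ≤ 2 * (p - a) + (q - b) by omega]
    · by_cases hn2 : (p - a) + 2 * (q - b) < 0
      · simp [pvCheck, h3, hn1, hn2, show ¬ 0 ≤ (p - a) + 2 * (q - b) by omega]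
      · have g1 : ((2 * (p - a) + (q - b)) % 3 == 0) = true := by simp only [beq_iff_eq]; omega
        have g2 : (((p - a) + 2 * (q - b)) % 3 == 0) = true := by simp only [beq_iff_eq]; omega
        have g3 : (decide ((3 : Int) ∣ 2 * (p - a) + (q - b))) = true := by
          simp only [decide_eq_true_eq]; omega
        have g4 : (decide ((3 : Int) ∣ (p - a) + 2 * (q - b))) = true := by
          simp only [decide_eq_true_eq]; omega
        simp [pvCheck, h3, hn1, hn2, g1, g2, g3, g4,
          show 0 ≤ 2 * (p - a) + (q - b) by omega, show 0 ≤ (p - a) + 2 * (q - b) by omega]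
  · simp [pvCheck, h3]
    omega

-- ===== VERDICT (by name: the statement is the Claim_ definition above) =====
theorem is_in_irrep_su3_py_spec : Claim_equal_is_in_irrep_su3_py := by
  rintro ⟨x, y⟩ ⟨p, q⟩ _
  show is_in_irrep_su3_py (x, y) (p, q) = is_in_irrep_su3_py_alt (x, y) (p, q)
  by_cases hx : 0 ≤ x <;> by_cases hy : 0 ≤ y <;> by_cases hxy : 0 ≤ x + y
  · -- dominant already
    exact pv_main_core x y p q x y ⟨0, by ring⟩ (pvFold_dom 20 hx hy)
      (by simp only [pvScan]
          rw [if_pos (show (0 ≤ x ∧ 0 ≤ y) from ⟨hx, hy⟩)]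
          rfl)
  · exact absurd (by omega) hxy
  · -- 0 ≤ x, y < 0, 0 ≤ x + y : one s2 step
    exact pv_main_core x y p q (x + y) (-y) ⟨0, by ring⟩
      (by rw [pvFold_s2 19 hx (by omega), pvFold_dom 19 (by omega) (by omega)])
      (by simp only [pvScan]
          rw [if_neg (show ¬ (0 ≤ x ∧ 0 ≤ y) by omega),
              if_neg (show ¬ (0 ≤ -x ∧ 0 ≤ x + y) by omega),
              if_pos (show (0 ≤ x + y ∧ 0 ≤ -y) by omega)]
          rfl)
  · -- 0 ≤ x, y < 0, x + y < 0 : s2 then s1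
    exact pv_main_core x y p q (-x - y) x ⟨-(x + y), by ring⟩
      (by rw [pvFold_s2 19 hx (by omega), pvFold_s1 18 (by omega),
              pvFold_dom 18 (by omega) (by omega)]
          exact congrArg₂ Prod.mk (by ring) (by ring))
      (by simp only [pvScan]
          rw [if_neg (show ¬ (0 ≤ x ∧ 0 ≤ y) by omega),
              if_neg (show ¬ (0 ≤ -x ∧ 0 ≤ x + y) by omega),
              if_neg (show ¬ (0 ≤ x + y ∧ 0 ≤ -y) by omega),
              if_pos (show (0 ≤ -x - y ∧ 0 ≤ x) from ⟨by omega, hx⟩)]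
          rfl)
  · -- x < 0, 0 ≤ y, 0 ≤ x + y : one s1 step
    exact pv_main_core x y p q (-x) (x + y) ⟨-x, by ring⟩
      (by rw [pvFold_s1 19 (by omega), pvFold_dom 19 (by omega) (by omega)])
      (by simp only [pvScan]
          rw [if_neg (show ¬ (0 ≤ x ∧ 0 ≤ y) by omega),
              if_pos (show (0 ≤ -x ∧ 0 ≤ x + y) by omega)]
          rfl)
  · -- x < 0, 0 ≤ y, x + y < 0 : s1 then s2
    exact pv_main_core x y p q y (-x - y) ⟨-x, by ring⟩
      (by rw [pvFold_s1 19 (by omega), pvFold_s2 18 (by omega) (by omega),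
              pvFold_dom 18 (by omega) (by omega)]
          exact congrArg₂ Prod.mk (by ring) (by ring))
      (by simp only [pvScan]
          rw [if_neg (show ¬ (0 ≤ x ∧ 0 ≤ y) by omega),
              if_neg (show ¬ (0 ≤ -x ∧ 0 ≤ x + y) by omega),
              if_neg (show ¬ (0 ≤ x + y ∧ 0 ≤ -y) by omega),
              if_neg (show ¬ (0 ≤ -x - y ∧ 0 ≤ x) by omega),
              if_pos (show (0 ≤ y ∧ 0 ≤ -x - y) by omega)]
          rfl)
  · exact absurd (by omega) hx
  · -- x < 0, y < 0 : s1, s2, s1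
    exact pv_main_core x y p q (-y) (-x) ⟨-(x + y), by ring⟩
      (by rw [pvFold_s1 19 (by omega), pvFold_s2 18 (by omega) (by omega),
              pvFold_s1 17 (by omega), pvFold_dom 17 (by omega) (by omega)]
          exact congrArg₂ Prod.mk (by ring) (by ring))
      (by simp only [pvScan]
          rw [if_neg (show ¬ (0 ≤ x ∧ 0 ≤ y) by omega),
              if_neg (show ¬ (0 ≤ -x ∧ 0 ≤ x + y) by omega),
              if_neg (show ¬ (0 ≤ x + y ∧ 0 ≤ -y) by omega),
              if_neg (show ¬ (0 ≤ -x - y ∧ 0 ≤ x) by omega),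
              if_neg (show ¬ (0 ≤ y ∧ 0 ≤ -x - y) by omega),
              if_pos (show (0 ≤ -y ∧ 0 ≤ -x) by omega)]
          rfl)
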